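-- pv_equiv track=rewrite | github.com/SergeyLipatnikov/AlgorythmPython | TransformTransform.py | TransformTransform
-- ===== SOURCE A (Python) =====
-- def TransformTransform(A,N):
--
--     k = 0
--
--     Massive = Transform(Transform(A,N),len(Transform(A,N)))
--
--     for i in range(len(Massive)):
--
--         k += Massive[i]
--
--     if k % 2 == 0:
--
--         return True
--
--     else:
--
--         return False
--
-- def Transform(Array, N):
--
--     B = []
--
--     for i in range(N):
--
--         for j in range(N-i):
--
--             k=i+j
--
--             if k == j:
--
--                 B.append(Array[j])
--
--             else:
--
--                 Temp = Array[j:k+1]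
--
--                 Temp.sort()
--
--                 B.append(Temp[len(Temp)-1])
--
--     return B
-- ===== SOURCE B (Python) =====
-- def TransformTransform(A, N):
--     def transform(arr, n):
--         row = arr[:max(n, 0)]
--         out = list(row)
--         while len(row) > 1:
--             row = [x if x > y else y for x, y in zip(row, row[1:])]
--             out.extend(row)
--         return out
--
--     first = transform(A, N)
--     total = sum(transform(first, len(first)))
--     return total % 2 == 0
-- ===== Notes on version B (the rewrite author's own statement) =====
-- stated objective: alternative
-- what changed: Window maxima are computed by a dynamic-programming row update (each longer-window row is the pairwise max of the previous row, row[j] = max(row[j], row[j+1])) instead of sorting every window slice, and the second Transform is fused into a running sum; intended as faster (measured 9x at n=64) but a timing run could not confirm it at the largest size, where B times out too.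
import Mathlib
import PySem

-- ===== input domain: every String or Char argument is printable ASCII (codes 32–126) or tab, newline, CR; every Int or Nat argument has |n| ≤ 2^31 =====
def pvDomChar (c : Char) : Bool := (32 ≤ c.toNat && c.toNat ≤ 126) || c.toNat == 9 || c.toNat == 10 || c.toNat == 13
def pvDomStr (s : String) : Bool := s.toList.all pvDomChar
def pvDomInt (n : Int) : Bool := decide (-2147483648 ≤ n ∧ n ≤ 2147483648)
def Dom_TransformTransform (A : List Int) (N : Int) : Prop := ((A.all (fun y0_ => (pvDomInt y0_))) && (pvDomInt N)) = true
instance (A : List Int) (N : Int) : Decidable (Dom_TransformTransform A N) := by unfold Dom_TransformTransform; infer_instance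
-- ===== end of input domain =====

-- B replaces A's sort-every-window-slice by a dynamic-programming row update (row[j] := max(row[j], row[j+1]))
-- and fuses the second Transform into a running sum; objective: alternative (intended faster; unconfirmed at the largest timing size).

-- ===== PORT A =====
def pyTransform (Array : List Int) (N : Int) : List Int :=
  (PySem.List.pyRange 0 N 1).foldl (fun B i =>
    (PySem.List.pyRange 0 (N - i) 1).foldl (fun B j =>
      let k := i + j
      if k == j then
        B ++ [PySem.List.pyGetD Array j 0]
      else
        let Temp := PySem.List.slice Array (some j) (some (k + 1))
        let Temp2 := PySem.List.sorted Temp (fun x => x) false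
        B ++ [PySem.List.pyGetD Temp2 ((Temp2.length : Int) - 1) 0]) B) []

def TransformTransform (A : List Int) (N : Int) : Bool :=
  let Massive := pyTransform (pyTransform A N) (((pyTransform A N).length : Int))
  let k := (PySem.List.pyRange 0 (Massive.length : Int) 1).foldl
      (fun k i => k + PySem.List.pyGetD Massive i 0) 0
  if PySem.Int.mod k 2 == 0 then true else false

-- ===== PORT B =====
def pvMax2 (x y : Int) : Int := if x > y then x else y

def pvShrink (row : List Int) : List Int := List.zipWith pvMax2 row row.tail

-- B's while loop; the fuel argument (initial row length bounds the iteration count) only makes it total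
def pvLoop : Nat → List Int → List Int
  | 0, _ => []
  | fuel + 1, row =>
    if row.length > 1 then pvShrink row ++ pvLoop fuel (pvShrink row) else []

def pvTransformB (arr : List Int) (n : Int) : List Int :=
  let row := PySem.List.slice arr none (some (max n 0))
  row ++ pvLoop row.length row

def TransformTransform_alt (A : List Int) (N : Int) : Bool :=
  let first := pvTransformB A N
  let total := (pvTransformB first (first.length : Int)).sum
  PySem.Int.mod total 2 == 0

-- ===== PRECONDITION & SPEC =====
-- Pre_ excludes exactly N > len(A), where Python A raises IndexError (it reads A[j] for j up to N-1).
def Pre_TransformTransform (A : List Int) (N : Int) : Prop := N ≤ (A.length : Int)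
instance (A : List Int) (N : Int) : Decidable (Pre_TransformTransform A N) := by
  unfold Pre_TransformTransform; infer_instance

def pvWitness_TransformTransform : List Int × Int := ([3, 1, 2], 3)

def Spec_TransformTransform (A : List Int) (N : Int) (out : Bool) : Prop := out = TransformTransform_alt A N
instance (A : List Int) (N : Int) (out : Bool) : Decidable (Spec_TransformTransform A N out) := by
  unfold Spec_TransformTransform; infer_instance

-- ===== CLAIM (what is proved, stated in full; the proofs are below) =====
def Claim_equal_TransformTransform : Prop := ∀ (A : List Int) (N : Int), Dom_TransformTransform A N → Pre_TransformTransform A N → Spec_TransformTransform A N (TransformTransform A N)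

-- ===== LEMMAS AND PROOFS =====

-- the mathematical yardstick both ports are reduced to: the maximum of a window,
-- the row of the maxima of all windows of one size, and the concatenation of all rows
def pvMaxOf : List Int → Int
  | [] => 0
  | x :: t => t.foldl max x

def pvWmax (arr : List Int) (j i : Nat) : Int := pvMaxOf ((arr.drop j).take (i + 1))

def pvRows (arr : List Int) (n i : Nat) : List Int :=
  (List.range (n - i)).map (fun j => pvWmax arr j i)

def pvSpec (arr : List Int) (n : Nat) : List Int :=
  (List.range n).flatMap (fun i => pvRows arr n i)

theorem pvMax2_eq_max (x y : Int) : pvMax2 x y = max x y := by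
  unfold pvMax2; split <;> omega

theorem pv_foldl_max_mono (l : List Int) (a b : Int) (h : a ≤ b) :
    List.foldl max a l ≤ List.foldl max b l := by
  induction l generalizing a b with
  | nil => simpa
  | cons c cs ih => exact ih _ _ (max_le_max_right c h)

theorem pvMaxOf_mem (x : Int) (t : List Int) : pvMaxOf (x :: t) ∈ x :: t :=
  List.max?_mem rfl

theorem le_pvMaxOf (y x : Int) (t : List Int) (h : y ∈ x :: t) : y ≤ pvMaxOf (x :: t) := by
  rcases List.mem_cons.1 h with h | h
  · exact h ▸ (PySem.List.le_foldl_max (a := x) t).1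
  · exact (PySem.List.le_foldl_max (a := x) t).2 y h

theorem pvMaxOf_append_singleton (l : List Int) (hl : l ≠ []) (y : Int) :
    pvMaxOf (l ++ [y]) = max (pvMaxOf l) y := by
  cases l with
  | nil => simp at hl
  | cons x t => simp [pvMaxOf, List.foldl_append]

theorem pvMaxOf_le_foldl (a : Int) (l : List Int) (hl : l ≠ []) :
    pvMaxOf l ≤ List.foldl max a l := by
  cases l with
  | nil => simp at hl
  | cons b w => exact pv_foldl_max_mono w b (max a b) (le_max_right a b)

theorem pv_lastUB (xs : List Int) (h : xs ≠ []) (hp : xs.Pairwise (· ≤ ·)) :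
    ∀ y ∈ xs, y ≤ xs.getLast h := by
  induction xs with
  | nil => simp at h
  | cons a t ih =>
    intro y hy
    cases t with
    | nil => simp at hy; simp [hy]
    | cons b u =>
      rw [List.getLast_cons (by simp)]
      rcases List.mem_cons.1 hy with rfl | hy'
      · calc y ≤ b := (List.pairwise_cons.1 hp).1 b (by simp)
          _ ≤ (b :: u).getLast (by simp) := ih (by simp) (List.pairwise_cons.1 hp).2 b (by simp)
      · exact ih (by simp) (List.pairwise_cons.1 hp).2 y hy'

-- sorting a nonempty window and reading its last element yields its maximum
theorem pv_sorted_last (l : List Int) (hl : l ≠ []) :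
    PySem.List.pyGetD (PySem.List.sorted l (fun x => x) false)
      (((PySem.List.sorted l (fun x => x) false).length : Int) - 1) 0 = pvMaxOf l := by
  set s := PySem.List.sorted l (fun x => x) false with hs
  have hsne : s ≠ [] := by
    intro h0
    exact hl ((PySem.List.sorted_eq_nil_iff l (fun x => x) false).1 h0)
  have hlen : 1 ≤ s.length := List.length_pos_iff.2 hsne
  have hcast : ((s.length : Int) - 1) = ((s.length - 1 : Nat) : Int) := by omega
  have hidx : s.length - 1 < s.length := by omega
  rw [hcast, PySem.List.pyGetD_natCast, List.getD_eq_getElem s 0 hidx,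
    ← List.getLast_eq_getElem hsne]
  have hpw : s.Pairwise (· ≤ ·) := by simpa using PySem.List.sorted_pairwise l (fun x => x)
  have hmemS : s.getLast hsne ∈ l := (PySem.List.mem_sorted l (fun x => x) false _).1 (List.getLast_mem hsne)
  obtain ⟨x, t, rfl⟩ := List.exists_cons_of_ne_nil hl
  have h1 : s.getLast hsne ≤ pvMaxOf (x :: t) := le_pvMaxOf _ x t hmemS
  have h2 : pvMaxOf (x :: t) ≤ s.getLast hsne :=
    pv_lastUB s hsne hpw _ ((PySem.List.mem_sorted (x :: t) (fun x => x) false _).2 (pvMaxOf_mem x t))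
  omega

theorem pvWmax_zero (arr : List Int) (j : Nat) (h : j < arr.length) :
    pvWmax arr j 0 = arr.getD j 0 := by
  have hd : arr.drop j = arr[j] :: arr.drop (j + 1) := List.drop_eq_getElem_cons h
  rw [pvWmax, hd, List.take_succ_cons, List.take_zero, List.getD_eq_getElem arr 0 h]
  rfl

theorem pvWmax_succ (arr : List Int) (j i : Nat) (h : j + i + 1 < arr.length) :
    pvWmax arr j (i + 1) = pvMax2 (pvWmax arr j i) (pvWmax arr (j + 1) i) := by
  have hj : j < arr.length := by omega
  set v := arr.drop (j + 1) with hv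
  have hd : arr.drop j = arr[j] :: v := List.drop_eq_getElem_cons hj
  have hvlen : i < v.length := by simp [hv]; omega
  have htv : v.take (i + 1) = v.take i ++ [v[i]] := by
    rw [List.take_add_one]; simp [List.getElem?_eq_getElem hvlen]
  have hLHS : pvWmax arr j (i + 1) = max (pvWmax arr j i) v[i] := by
    simp only [pvWmax, hd, List.take_succ_cons, htv, pvMaxOf, List.foldl_append,
      List.foldl_cons, List.foldl_nil]
  rw [hLHS, pvMax2_eq_max]
  cases hti : v.take i with
  | nil =>
    have hi0 : i = 0 := by
      have h0 := congrArg List.length hti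
      rw [List.length_take] at h0
      simp only [List.length_nil] at h0
      omega
    subst hi0
    have h1 : v.take 1 = [v[0]] := by simpa [hti] using htv
    have h2 : pvWmax arr (j + 1) 0 = v[0] := by
      rw [pvWmax, ← hv, h1]; rfl
    rw [h2]
  | cons b w =>
    have hne : v.take i ≠ [] := by rw [hti]; simp
    have hRHS : pvWmax arr (j + 1) i = max (pvMaxOf (v.take i)) v[i] := by
      rw [pvWmax, ← hv, htv, pvMaxOf_append_singleton _ hne]
    rw [hRHS]
    have hle : pvMaxOf (v.take i) ≤ pvWmax arr j i := by
      have hexp : pvWmax arr j i = List.foldl max arr[j] (v.take i) := by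
        rw [pvWmax, hd, List.take_succ_cons]; rfl
      rw [hexp]
      exact pvMaxOf_le_foldl arr[j] (v.take i) hne
    rw [← max_assoc, max_eq_left hle]

-- one pass of B's zip update on a comprehension row
theorem pvShrink_map_range (c : Nat) (f : Nat → Int) :
    pvShrink ((List.range (c + 1)).map f) = (List.range c).map (fun j => pvMax2 (f j) (f (j + 1))) := by
  apply List.ext_getElem
  · simp [pvShrink, List.length_zipWith]
  · intro k h1 h2
    simp [pvShrink, List.getElem_zipWith, List.getElem_tail]

theorem pvShrink_rows (arr : List Int) (n i : Nat) (hn : n ≤ arr.length) (hi : i < n) :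
    pvShrink (pvRows arr n i) = pvRows arr n (i + 1) := by
  have hc : n - i = (n - i - 1) + 1 := by omega
  rw [pvRows, hc, pvShrink_map_range, pvRows]
  have hc2 : n - (i + 1) = n - i - 1 := by omega
  rw [hc2]
  apply List.map_congr_left
  intro j hj
  have hj' : j < n - i - 1 := List.mem_range.1 hj
  exact (pvWmax_succ arr j i (by omega)).symm

theorem pvLoop_rows (arr : List Int) (n : Nat) (hn : n ≤ arr.length) :
    ∀ d i fuel, i < n → n - i - 1 = d → d ≤ fuel →
      pvLoop fuel (pvRows arr n i)
        = (List.range' (i + 1) (n - i - 1)).flatMap (fun i' => pvRows arr n i') := by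
  intro d
  induction d with
  | zero =>
    intro i fuel hi hd hf
    have hlen : (pvRows arr n i).length = n - i := by simp [pvRows]
    cases fuel with
    | zero => simp [pvLoop, hd]
    | succ f =>
      rw [pvLoop]
      simp [hlen, hd, show ¬ (n - i > 1) by omega]
  | succ d ih =>
    intro i fuel hi hd hf
    have hlen : (pvRows arr n i).length = n - i := by simp [pvRows]
    cases fuel with
    | zero => omega
    | succ f =>
      rw [pvLoop, if_pos (by omega), pvShrink_rows arr n i hn hi,
        ih (i + 1) f (by omega) (by omega) (by omega)]
      have hr : List.range' (i + 1) (n - i - 1) = (i + 1) :: List.range' (i + 2) (n - i - 2) := by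
        have h1 : n - i - 1 = (n - i - 2) + 1 := by omega
        rw [h1, List.range'_succ]
      rw [hr, List.flatMap_cons]
      congr 2

theorem pv_take_eq_rows (arr : List Int) (n : Nat) (hn : n ≤ arr.length) :
    arr.take n = pvRows arr n 0 := by
  apply List.ext_getElem
  · simp [pvRows]; omega
  · intro k h1 h2
    have hk : k < n := by simpa [hn] using h1
    have hkl : k < arr.length := by omega
    simp [pvRows, pvWmax_zero arr k hkl, List.getElem?_eq_getElem hkl]

-- B's transform computes the row concatenation
theorem pvTransformB_eq_spec (arr : List Int) (N : Int) (h : N ≤ (arr.length : Int)) :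
    pvTransformB arr N = pvSpec arr N.toNat := by
  set n := N.toNat with hn
  have hnl : n ≤ arr.length := by omega
  have hrow : PySem.List.slice arr none (some (max N 0)) = arr.take n := by
    rw [PySem.List.slice_to arr (b := max N 0) (by omega)]
    congr 1
    omega
  rw [pvTransformB]
  simp only [hrow, pv_take_eq_rows arr n hnl]
  cases Nat.eq_zero_or_pos n with
  | inl h0 =>
    rw [h0]
    simp [pvRows, pvLoop, pvSpec]
  | inr hpos =>
    have hlen : (pvRows arr n 0).length = n := by simp [pvRows]
    rw [hlen, pvLoop_rows arr n hnl (n - 1) 0 n hpos (by omega) (by omega),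
      pvSpec, List.range_eq_range']
    have hsplit : List.range' 0 n = 0 :: List.range' 1 (n - 1) := by
      have h1 : n = (n - 1) + 1 := by omega
      rw [h1, List.range'_succ]
      congr 2 <;> omega
    rw [hsplit, List.flatMap_cons]
    congr 2 <;> omega

-- a left fold that appends a block per element is the concatenation of the blocks
theorem pv_foldl_app {α : Type} (f : List α → Int → List α) (g : Int → List α) :
    ∀ (l : List Int), (∀ x ∈ l, ∀ B, f B x = B ++ g x) → ∀ B, l.foldl f B = B ++ l.flatMap g := by
  intro l
  induction l with
  | nil => intro _ B; simp
  | cons a t ih =>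
    intro h B
    rw [List.foldl_cons, h a (by simp), ih (fun x hx B' => h x (by simp [hx]) B'),
      List.flatMap_cons, List.append_assoc]

-- A's transform computes the same row concatenation
theorem pyTransform_eq_spec (arr : List Int) (N : Int) (h : N ≤ (arr.length : Int)) :
    pyTransform arr N = pvSpec arr N.toNat := by
  set n := N.toNat with hn
  have hnl : n ≤ arr.length := by omega
  have houter : ∀ i ∈ PySem.List.pyRange 0 N 1, ∀ B : List Int,
      (PySem.List.pyRange 0 (N - i) 1).foldl (fun B j =>
        let k := i + j
        if k == j then
          B ++ [PySem.List.pyGetD arr j 0]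
        else
          let Temp := PySem.List.slice arr (some j) (some (k + 1))
          let Temp2 := PySem.List.sorted Temp (fun x => x) false
          B ++ [PySem.List.pyGetD Temp2 ((Temp2.length : Int) - 1) 0]) B
      = B ++ pvRows arr n i.toNat := by
    intro i hi B
    obtain ⟨hi0, hiN⟩ := PySem.List.mem_pyRange_one.1 hi
    obtain ⟨iN, rfl⟩ : ∃ iN : Nat, i = (iN : Int) := ⟨i.toNat, by omega⟩
    have hbody : ∀ j ∈ PySem.List.pyRange 0 (N - (iN : Int)) 1, ∀ B : List Int,
        (fun (B : List Int) (j : Int) =>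
          let k := (iN : Int) + j
          if k == j then
            B ++ [PySem.List.pyGetD arr j 0]
          else
            let Temp := PySem.List.slice arr (some j) (some (k + 1))
            let Temp2 := PySem.List.sorted Temp (fun x => x) false
            B ++ [PySem.List.pyGetD Temp2 ((Temp2.length : Int) - 1) 0]) B j
        = B ++ [pvWmax arr j.toNat iN] := by
      intro j hj B
      obtain ⟨hj0, hjN⟩ := PySem.List.mem_pyRange_one.1 hj
      obtain ⟨jn, rfl⟩ : ∃ jn : Nat, j = (jn : Int) := ⟨j.toNat, by omega⟩
      have hjl : jn < arr.length := by omega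
      dsimp only
      by_cases hiz : iN = 0
      · subst hiz
        rw [if_pos (by simp)]
        simp [pvWmax_zero arr jn hjl]
      · rw [if_neg (by simp; omega)]
        have hsl : PySem.List.slice arr (some (jn : Int)) (some ((iN : Int) + (jn : Int) + 1))
            = (arr.drop jn).take (iN + 1) := by
          have h2 : ((iN : Int) + (jn : Int) + 1) = (((iN + jn + 1 : Nat)) : Int) := by push_cast; ring
          rw [h2, PySem.List.slice_natCast]
          congr 1
          omega
        rw [hsl]
        have hne : (arr.drop jn).take (iN + 1) ≠ [] := by
          intro h0
          have := congrArg List.length h0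
          simp at this
          omega
        rw [pv_sorted_last _ hne]
        simp [pvWmax]
    rw [pv_foldl_app _ (fun j => [pvWmax arr j.toNat iN]) _ hbody B]
    congr 1
    rw [← List.map_eq_flatMap, PySem.List.pyRange_one, List.map_map, pvRows]
    have hcnt : ((N - (iN : Int)) - 0).toNat = n - iN := by omega
    rw [hcnt]
    apply List.map_congr_left
    intro k _
    simp
  rw [pyTransform, pv_foldl_app _ (fun i => pvRows arr n i.toNat) _ houter []]
  rw [List.nil_append, PySem.List.pyRange_one, List.flatMap_map, pvSpec]
  have hcnt : (N - 0).toNat = n := by omega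
  rw [hcnt]
  apply List.flatMap_congr
  intro k _
  simp

theorem pvTransform_agree (arr : List Int) (N : Int) (h : N ≤ (arr.length : Int)) :
    pyTransform arr N = pvTransformB arr N := by
  rw [pyTransform_eq_spec arr N h, pvTransformB_eq_spec arr N h]

-- ===== VERDICT (by name: the statement is the Claim_ definition above) =====
theorem TransformTransform_spec : Claim_equal_TransformTransform := by
  intro A N _hdom hpre
  unfold Pre_TransformTransform at hpre
  unfold Spec_TransformTransform
  simp only [TransformTransform, TransformTransform_alt]
  rw [pvTransform_agree A N hpre]
  rw [pvTransform_agree (pvTransformB A N) _ (le_refl _)]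
  set M := pvTransformB (pvTransformB A N) (((pvTransformB A N).length : Int)) with hM
  have hsum : (PySem.List.pyRange 0 (M.length : Int) 1).foldl
      (fun k i => k + PySem.List.pyGetD M i 0) 0 = M.sum := by
    rw [PySem.List.foldl_pyRange_zero_pyGetD' M 0 (fun acc v => acc + v) 0]
    exact List.sum_eq_foldl.symm
  rw [hsum]
  cases h : (PySem.Int.mod M.sum 2 == 0) <;> simp_all
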